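-- pv_equiv track=rewrite | github.com/perhorst1234/dashboard-app | dashboard_app/utils/key_sequences.py | format_key_sequence
-- ===== SOURCE A (Python) =====
-- from typing import Iterable, List
--
-- MODIFIER_ORDER = ("ctrl", "shift", "alt", "win")
--
-- _DISPLAY_NAMES = {
--     "ctrl": "Ctrl",
--     "shift": "Shift",
--     "alt": "Alt",
--     "win": "Win",
--     "escape": "Esc",
--     "enter": "Enter",
--     "return": "Enter",
--     "tab": "Tab",
--     "space": "Space",
--     "backspace": "Backspace",
--     "delete": "Delete",
--     "insert": "Insert",
--     "home": "Home",
--     "end": "End",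
--     "pageup": "Page Up",
--     "pagedown": "Page Down",
--     "left": "Left",
--     "right": "Right",
--     "up": "Up",
--     "down": "Down",
--     "printscreen": "Print Screen",
--     "volumeup": "Volume Up",
--     "volumedown": "Volume Down",
--     "volumemute": "Mute",
-- }
--
-- def order_tokens(tokens: Iterable[str]) -> List[str]:
--     unique: List[str] = []
--     for token in tokens:
--         if token not in unique:
--             unique.append(token)
--     modifiers = [token for token in MODIFIER_ORDER if token in unique]
--     others = [token for token in unique if token not in MODIFIER_ORDER]
--     return modifiers + others
--
-- def format_key_sequence(tokens: Iterable[str]) -> str: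
--     ordered = order_tokens(tokens)
--     if not ordered:
--         return ""
--     formatted: List[str] = []
--     for token in ordered:
--         if token.startswith("f") and token[1:].isdigit():
--             formatted.append(token.upper())
--         elif token.isalpha() and len(token) == 1:
--             formatted.append(token.upper())
--         else:
--             formatted.append(_DISPLAY_NAMES.get(token, token.capitalize()))
--     return " + ".join(formatted)
-- ===== SOURCE B (Python) =====
-- MODIFIER_ORDER = ("ctrl", "shift", "alt", "win")
--
-- _DISPLAY_NAMES = {
--     "ctrl": "Ctrl", "shift": "Shift", "alt": "Alt", "win": "Win",
--     "escape": "Esc", "enter": "Enter", "return": "Enter", "tab": "Tab",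
--     "space": "Space", "backspace": "Backspace", "delete": "Delete",
--     "insert": "Insert", "home": "Home", "end": "End",
--     "pageup": "Page Up", "pagedown": "Page Down",
--     "left": "Left", "right": "Right", "up": "Up", "down": "Down",
--     "printscreen": "Print Screen", "volumeup": "Volume Up",
--     "volumedown": "Volume Down", "volumemute": "Mute",
-- }
--
--
-- def _rank(token):
--     # modifiers rank by their place in MODIFIER_ORDER, everything else ranks last
--     try:
--         return MODIFIER_ORDER.index(token)
--     except ValueError:
--         return len(MODIFIER_ORDER)
--
--
-- def _display(token):
--     if token.startswith("f") and token[1:].isdigit():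
--         return token.upper()
--     if token.isalpha() and len(token) == 1:
--         return token.upper()
--     return _DISPLAY_NAMES.get(token, token.capitalize())
--
--
-- def format_key_sequence(tokens):
--     # Dedup with dict.fromkeys (hash-based, keeps first occurrences), then a
--     # single stable sort by rank: modifiers land in MODIFIER_ORDER order, the
--     # rest keep first-seen order via sort stability.  Replaces A's quadratic
--     # list-membership dedup plus two partition passes.
--     ordered = sorted(dict.fromkeys(tokens), key=_rank)
--     return " + ".join(map(_display, ordered))
-- ===== Notes on version B (the rewrite author's own statement) =====
-- stated objective: faster
-- what changed: Replaces A's quadratic list-membership dedup followed by two partition passes (modifiers filtered by MODIFIER_ORDER, others filtered out) with dict.fromkeys dedup plus ONE stable sort keyed on the modifier's rank in MODIFIER_ORDER (non-modifiers rank last and keep first-seen order by stability).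
import Mathlib
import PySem

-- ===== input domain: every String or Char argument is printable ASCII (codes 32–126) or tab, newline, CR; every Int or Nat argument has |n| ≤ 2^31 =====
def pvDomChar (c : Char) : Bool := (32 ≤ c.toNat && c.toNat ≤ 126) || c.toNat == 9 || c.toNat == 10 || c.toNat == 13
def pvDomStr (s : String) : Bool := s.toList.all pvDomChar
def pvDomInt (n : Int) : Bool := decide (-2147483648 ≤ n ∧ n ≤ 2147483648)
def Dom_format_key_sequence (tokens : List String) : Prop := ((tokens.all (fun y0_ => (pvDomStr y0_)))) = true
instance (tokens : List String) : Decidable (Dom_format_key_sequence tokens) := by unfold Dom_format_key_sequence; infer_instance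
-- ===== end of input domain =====

-- B replaces A's quadratic list-membership dedup plus two partition passes with
-- dict.fromkeys dedup followed by ONE stable sort keyed on the modifier rank.

-- ===== PORT A =====
def MODIFIER_ORDER : List String := ["ctrl", "shift", "alt", "win"]

def DISPLAY_NAMES : PySem.Dict String String := PySem.Dict.ofList
  [("ctrl", "Ctrl"), ("shift", "Shift"), ("alt", "Alt"), ("win", "Win"),
   ("escape", "Esc"), ("enter", "Enter"), ("return", "Enter"), ("tab", "Tab"),
   ("space", "Space"), ("backspace", "Backspace"), ("delete", "Delete"),
   ("insert", "Insert"), ("home", "Home"), ("end", "End"),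
   ("pageup", "Page Up"), ("pagedown", "Page Down"),
   ("left", "Left"), ("right", "Right"), ("up", "Up"), ("down", "Down"),
   ("printscreen", "Print Screen"), ("volumeup", "Volume Up"),
   ("volumedown", "Volume Down"), ("volumemute", "Mute")]

-- hand port of str.capitalize (no PySem primitive): first char uppercased, rest
-- lowered — exact on the ASCII domain (ASCII title-case = upper-case)
def pyCapitalize (s : String) : String :=
  match s.toList with
  | [] => ""
  | c :: cs => String.ofList (PySem.Chars.upperChar c :: cs.map PySem.Chars.lowerChar)

def order_tokens (tokens : List String) : List String :=
  let unique := tokens.foldl (fun u token => if u.contains token then u else u ++ [token]) []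
  let modifiers := MODIFIER_ORDER.filter (fun token => unique.contains token)
  let others := unique.filter (fun token => !(MODIFIER_ORDER.contains token))
  modifiers ++ others

def format_key_sequence (tokens : List String) : String :=
  let ordered := order_tokens tokens
  if ordered = [] then ""
  else
    let formatted := ordered.foldl (fun acc token =>
      if PySem.Str.startswith token "f" &&
          PySem.Str.strIsdigit (PySem.Str.slice token (some 1) none) then
        acc ++ [PySem.Str.upper token]
      else if PySem.Str.strIsalpha token && PySem.Str.len token == 1 then
        acc ++ [PySem.Str.upper token]
      else
        acc ++ [DISPLAY_NAMES.getD token (pyCapitalize token)]) ([] : List String)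
    PySem.Str.join " + " formatted

-- ===== PORT B =====
-- _rank: 'try: MODIFIER_ORDER.index(token) / except ValueError: len(MODIFIER_ORDER)'
-- (PySem.List.index? returns none exactly where .index raises ValueError)
def rank (token : String) : Int :=
  match PySem.List.index? MODIFIER_ORDER token with
  | some i => (i : Int)
  | none => (MODIFIER_ORDER.length : Int)

def display (token : String) : String :=
  if PySem.Str.startswith token "f" &&
      PySem.Str.strIsdigit (PySem.Str.slice token (some 1) none) then
    PySem.Str.upper token
  else if PySem.Str.strIsalpha token && PySem.Str.len token == 1 then
    PySem.Str.upper token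
  else
    DISPLAY_NAMES.getD token (pyCapitalize token)

def format_key_sequence_alt (tokens : List String) : String :=
  let ordered := PySem.List.sorted (PySem.List.dedup tokens) rank
  PySem.Str.join " + " (ordered.map display)

-- ===== PRECONDITION & SPEC =====
def Spec_format_key_sequence (tokens : List String) (out : String) : Prop := out = format_key_sequence_alt tokens
instance (tokens : List String) (out : String) : Decidable (Spec_format_key_sequence tokens out) := by unfold Spec_format_key_sequence; infer_instance

-- ===== CLAIM =====
def Claim_equal_format_key_sequence : Prop := ∀ (tokens : List String), Dom_format_key_sequence tokens → Spec_format_key_sequence tokens (format_key_sequence tokens)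

-- ===== LEMMAS AND PROOFS =====
-- bef: the comparison insertion sort uses under the key 'rank'
def bef (a b : String) : Bool := decide (rank a < rank b)

-- tgt pre: A's ordering of the distinct tokens pre (modifiers first, in
-- MODIFIER_ORDER, then the rest in first-seen order) — the loop invariant
def tgt (pre : List String) : List String :=
  MODIFIER_ORDER.filter (fun m => pre.contains m) ++
  pre.filter (fun t => !(MODIFIER_ORDER.contains t))

@[simp] theorem rank_ctrl : rank "ctrl" = 0 := by decide
@[simp] theorem rank_shift : rank "shift" = 1 := by decide
@[simp] theorem rank_alt : rank "alt" = 2 := by decide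
@[simp] theorem rank_win : rank "win" = 3 := by decide

theorem rank_of_not_mem (t : String) (h : t ∉ MODIFIER_ORDER) : rank t = 4 := by
  have hn : List.idxOf? t MODIFIER_ORDER = none := List.idxOf?_eq_none_iff.mpr h
  simp only [rank, PySem.List.index?_eq_idxOf?, hn]
  decide

theorem rankLe (t : String) : rank t ≤ 4 := by
  unfold rank
  cases h : PySem.List.index? MODIFIER_ORDER t with
  | none => decide
  | some k =>
    obtain ⟨hk, -⟩ := PySem.List.getElem_of_index?_eq_some h
    have hlen : MODIFIER_ORDER.length = 4 := rfl
    rw [hlen] at hk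
    show ((k : Nat) : Int) ≤ 4
    omega

theorem ins_front (before : String → String → Bool) (x : String) (l : List String)
    (h : ∀ y ∈ l, before x y = true) : PySem.List.insertBy before x l = x :: l := by
  cases l with
  | nil => rfl
  | cons y ys => simp [PySem.List.insertBy, h y (by simp)]

theorem oth_front (x : String) (hx : rank x < 4) (pre : List String) :
    PySem.List.insertBy bef x (List.filter (fun t => !(MODIFIER_ORDER.contains t)) pre) =
      x :: List.filter (fun t => !(MODIFIER_ORDER.contains t)) pre := by
  apply ins_front
  intro y hy
  have h1 := List.of_mem_filter hy
  have h2 : y ∉ MODIFIER_ORDER := by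
    intro hmem
    rw [Bool.not_eq_eq_eq_not, Bool.not_true] at h1
    exact absurd ((List.contains_iff_mem).mpr hmem) (by rw [h1]; exact Bool.false_ne_true)
  have hr : rank y = 4 := rank_of_not_mem y h2
  simp [bef, hr, hx]

theorem filter_app (x : String) (hm : MODIFIER_ORDER.contains x = true) (pre : List String) :
    List.filter (fun t => !(MODIFIER_ORDER.contains t)) (pre ++ [x])
      = List.filter (fun t => !(MODIFIER_ORDER.contains t)) pre := by
  rw [List.filter_append]
  simp
  exact List.contains_iff_mem.mp hm

theorem step_ctrl (pre : List String) (hx : "ctrl" ∉ pre) :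
    PySem.List.insertBy bef "ctrl" (tgt pre) = tgt (pre ++ ["ctrl"]) := by
  have hxc : pre.contains "ctrl" = false := by
    rw [Bool.eq_false_iff]; intro hc; exact hx (List.contains_iff_mem.mp hc)
  have hoth := oth_front "ctrl" (by decide) pre
  unfold tgt
  rw [filter_app "ctrl" (by decide) pre]
  revert hoth
  generalize List.filter (fun t => !(MODIFIER_ORDER.contains t)) pre = os
  intro hoth
  simp only [ MODIFIER_ORDER, List.filter_cons, List.filter_nil, List.contains_append, hxc]
  by_cases h2 : pre.contains "shift" <;> by_cases h3 : pre.contains "alt" <;>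
    by_cases h4 : pre.contains "win" <;>
    simp_all [PySem.List.insertBy, bef]

theorem step_shift (pre : List String) (hx : "shift" ∉ pre) :
    PySem.List.insertBy bef "shift" (tgt pre) = tgt (pre ++ ["shift"]) := by
  have hxc : pre.contains "shift" = false := by
    rw [Bool.eq_false_iff]; intro hc; exact hx (List.contains_iff_mem.mp hc)
  have hoth := oth_front "shift" (by decide) pre
  unfold tgt
  rw [filter_app "shift" (by decide) pre]
  revert hoth
  generalize List.filter (fun t => !(MODIFIER_ORDER.contains t)) pre = os
  intro hoth
  simp only [ MODIFIER_ORDER, List.filter_cons, List.filter_nil, List.contains_append, hxc]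
  by_cases h1 : pre.contains "ctrl" <;> by_cases h3 : pre.contains "alt" <;>
    by_cases h4 : pre.contains "win" <;>
    simp_all [PySem.List.insertBy, bef]

theorem step_alt (pre : List String) (hx : "alt" ∉ pre) :
    PySem.List.insertBy bef "alt" (tgt pre) = tgt (pre ++ ["alt"]) := by
  have hxc : pre.contains "alt" = false := by
    rw [Bool.eq_false_iff]; intro hc; exact hx (List.contains_iff_mem.mp hc)
  have hoth := oth_front "alt" (by decide) pre
  unfold tgt
  rw [filter_app "alt" (by decide) pre]
  revert hoth
  generalize List.filter (fun t => !(MODIFIER_ORDER.contains t)) pre = os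
  intro hoth
  simp only [ MODIFIER_ORDER, List.filter_cons, List.filter_nil, List.contains_append, hxc]
  by_cases h1 : pre.contains "ctrl" <;> by_cases h2 : pre.contains "shift" <;>
    by_cases h4 : pre.contains "win" <;>
    simp_all [PySem.List.insertBy, bef]

theorem step_win (pre : List String) (hx : "win" ∉ pre) :
    PySem.List.insertBy bef "win" (tgt pre) = tgt (pre ++ ["win"]) := by
  have hxc : pre.contains "win" = false := by
    rw [Bool.eq_false_iff]; intro hc; exact hx (List.contains_iff_mem.mp hc)
  have hoth := oth_front "win" (by decide) pre
  unfold tgt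
  rw [filter_app "win" (by decide) pre]
  revert hoth
  generalize List.filter (fun t => !(MODIFIER_ORDER.contains t)) pre = os
  intro hoth
  simp only [ MODIFIER_ORDER, List.filter_cons, List.filter_nil, List.contains_append, hxc]
  by_cases h1 : pre.contains "ctrl" <;> by_cases h2 : pre.contains "shift" <;>
    by_cases h3 : pre.contains "alt" <;>
    simp_all [PySem.List.insertBy, bef]

theorem step (x : String) (pre : List String) (hx : x ∉ pre) :
    PySem.List.insertBy bef x (tgt pre) = tgt (pre ++ [x]) := by
  by_cases hm : x ∈ MODIFIER_ORDER
  · simp only [ MODIFIER_ORDER, List.mem_cons, List.not_mem_nil, or_false] at hm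
    rcases hm with rfl | rfl | rfl | rfl
    · exact step_ctrl pre hx
    · exact step_shift pre hx
    · exact step_alt pre hx
    · exact step_win pre hx
  · have hr : rank x = 4 := rank_of_not_mem x hm
    have hall : ∀ y ∈ tgt pre, bef x y = false := by
      intro y _
      simp only [bef, hr, decide_eq_false_iff_not, not_lt]
      exact rankLe y
    rw [PySem.List.insertBy_of_forall_not_before _ _ _ hall]
    have hmc : MODIFIER_ORDER.contains x = false := by
      rw [Bool.eq_false_iff]; intro hc; exact hm (List.contains_iff_mem.mp hc)
    unfold tgt
    have h1 : MODIFIER_ORDER.filter (fun m => (pre ++ [x]).contains m)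
        = MODIFIER_ORDER.filter (fun m => pre.contains m) := by
      apply List.filter_congr
      intro m hmem
      have hne : m ≠ x := fun h => hm (h ▸ hmem)
      simp [hne]
    rw [h1, List.filter_append]
    simp [hm]

theorem foldl_step (l : List String) : ∀ pre : List String, (pre ++ l).Nodup →
    l.foldl (fun acc x => PySem.List.insertBy bef x acc) (tgt pre) = tgt (pre ++ l) := by
  induction l with
  | nil => intro pre _; simp
  | cons x xs ih =>
    intro pre h
    have h' := h
    rw [List.nodup_append] at h'
    obtain ⟨-, -, hd⟩ := h'
    have hx : x ∉ pre := fun hmem => hd x hmem x List.mem_cons_self rfl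
    rw [List.foldl_cons, step x pre hx]
    have := ih (pre ++ [x]) (by simpa using h)
    simpa using this

theorem sorted_rank (u : List String) (hn : u.Nodup) :
    PySem.List.sorted u rank = tgt u := by
  rw [PySem.List.sorted_eq_foldl_insertBy]
  have h0 : tgt [] = [] := by simp [tgt, MODIFIER_ORDER]
  have := foldl_step u [] (by simpa using hn)
  rw [h0] at this
  simpa [show (fun a b => decide (rank a < rank b)) = bef from rfl] using this

theorem fmt_fold (l : List String) :
    l.foldl (fun acc token =>
      if PySem.Str.startswith token "f" &&
          PySem.Str.strIsdigit (PySem.Str.slice token (some 1) none) then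
        acc ++ [PySem.Str.upper token]
      else if PySem.Str.strIsalpha token && PySem.Str.len token == 1 then
        acc ++ [PySem.Str.upper token]
      else
        acc ++ [DISPLAY_NAMES.getD token (pyCapitalize token)]) ([] : List String)
      = l.map display := by
  have h : (fun (acc : List String) (token : String) =>
      if PySem.Str.startswith token "f" &&
          PySem.Str.strIsdigit (PySem.Str.slice token (some 1) none) then
        acc ++ [PySem.Str.upper token]
      else if PySem.Str.strIsalpha token && PySem.Str.len token == 1 then
        acc ++ [PySem.Str.upper token]
      else
        acc ++ [DISPLAY_NAMES.getD token (pyCapitalize token)])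
      = fun acc token => acc ++ [display token] := by
    funext acc token
    simp only [display]
    split_ifs <;> rfl
  rw [h]
  simpa using PySem.List.foldl_append_singleton_eq_map display l []

theorem unique_eq_dedup (tokens : List String) :
    tokens.foldl (fun u token => if u.contains token then u else u ++ [token]) []
      = PySem.List.dedup tokens := by
  rw [PySem.List.dedup_eq_ofList, PySem.Set.ofList_eq_foldl]
  rfl

-- ===== VERDICT =====
theorem format_key_sequence_spec : Claim_equal_format_key_sequence := by
  intro tokens _
  unfold Spec_format_key_sequence format_key_sequence format_key_sequence_alt order_tokens
  simp only [unique_eq_dedup, sorted_rank _ (PySem.List.nodup_dedup tokens), fmt_fold, tgt]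
  split
  · next h => rw [h]; rfl
  · rfl
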